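-- pv_equiv track=rewrite | github.com/Harritonas2/Moon-Net | Moon-Net.py | fire
-- ===== SOURCE A (Python) =====
-- def fire(text):
--     faded = ""
--     green = 250
--     for line in text.splitlines():
--         faded += (f"\033[38;2;255;{green};0m{line}\033[0m\n")
--         if not green == 0:
--             green -= 25
--             if green < 0:
--                 green = 0
--     return faded
-- ===== SOURCE B (Python) =====
-- def fire(text):
--     lines = text.splitlines()
--     palette = list(range(250, -1, -25))
--     head = [f"\033[38;2;255;{g};0m{line}\033[0m\n" for line, g in zip(lines, palette)]
--     tail = [f"\033[38;2;255;0;0m{line}\033[0m\n" for line in lines[len(head):]]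
--     return "".join(head + tail)
-- ===== Notes on version B (the rewrite author's own statement) =====
-- stated objective: alternative
-- what changed: Replaced A's single loop with a mutable decrement-and-clamp green accumulator by a staged build: a precomputed palette list(range(250,-1,-25)) zipped against the leading lines, a separate constant-color pass over the remaining lines, and a final join.
import Mathlib
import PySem

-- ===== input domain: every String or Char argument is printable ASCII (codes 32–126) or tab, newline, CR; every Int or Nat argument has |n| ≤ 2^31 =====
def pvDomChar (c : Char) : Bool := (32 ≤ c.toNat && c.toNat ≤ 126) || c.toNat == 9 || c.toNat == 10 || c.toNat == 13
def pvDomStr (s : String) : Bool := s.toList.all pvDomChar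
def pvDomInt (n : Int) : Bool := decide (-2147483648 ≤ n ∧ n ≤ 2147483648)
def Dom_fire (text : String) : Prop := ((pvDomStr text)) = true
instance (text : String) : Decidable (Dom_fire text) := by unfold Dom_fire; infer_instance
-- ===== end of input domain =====

-- B replaces A's running decrement-and-clamp accumulator with a staged build: a precomputed
-- palette range(250,-1,-25) zipped against the leading lines, a separate constant-color pass
-- over the remaining lines, joined at the end (alternative decomposition; return value equal).


-- ===== PORT A =====
-- one loop iteration of A: append the colored line, then decrement-and-clamp green
def fireStep (st : String × Int) (line : String) : String × Int :=
  (st.1 ++ "\x1b[38;2;255;" ++ PySem.Int.toStr st.2 ++ ";0m" ++ line ++ "\x1b[0m\n",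
   if st.2 ≠ 0 then (if st.2 - 25 < 0 then 0 else st.2 - 25) else st.2)

def fire (text : String) : String :=
  ((PySem.Str.splitlines text).foldl fireStep ("", 250)).1

-- ===== PORT B =====
-- B's head comprehension body: line paired with its palette color
def fireHeadLine (p : String × Int) : String :=
  "\x1b[38;2;255;" ++ PySem.Int.toStr p.2 ++ ";0m" ++ p.1 ++ "\x1b[0m\n"

-- B's tail comprehension body: constant color 0
def fireTailLine (line : String) : String :=
  "\x1b[38;2;255;0;0m" ++ line ++ "\x1b[0m\n"

def fire_alt (text : String) : String :=
  let lines := PySem.Str.splitlines text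
  let palette := PySem.List.pyRange 250 (-1) (-25)
  let head := (lines.zip palette).map fireHeadLine
  let tail := (PySem.List.slice lines (some (head.length : Int)) none).map fireTailLine
  PySem.Str.join "" (head ++ tail)

-- ===== PRECONDITION & SPEC =====
def Spec_fire (text : String) (out : String) : Prop := out = fire_alt text
instance (text : String) (out : String) : Decidable (Spec_fire text out) := by unfold Spec_fire; infer_instance

-- ===== CLAIM (what is proved, stated in full; the proofs are below) =====
def Claim_equal_fire : Prop := ∀ (text : String), Dom_fire text → Spec_fire text (fire text)

-- ===== LEMMAS AND PROOFS =====
theorem pv_str_ext {s t : String} (h : s.toList = t.toList) : s = t := by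
  have := congrArg String.ofList h; simpa using this

theorem pv_join_empty_cons (x : String) (l : List String) :
    PySem.Str.join "" (x :: l) = x ++ PySem.Str.join "" l := by
  apply pv_str_ext
  cases l <;> simp [PySem.Str.join, PySem.Chars.join, List.intercalate]

-- the invariant tying A's running green to the rest of B's palette:
-- pvInv g P holds when A's green sequence starting at g is P followed by constant 0
def pvInv : Int → List Int → Bool
  | g, [] => g == 0
  | g, p :: P => (p == g) && pvInv (if g ≠ 0 then (if g - 25 < 0 then 0 else g - 25) else g) P

-- once green is 0 A keeps emitting B's tail lines
theorem pv_tail (ls : List String) : ∀ (acc : String),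
    (ls.foldl fireStep (acc, 0)).1 = acc ++ PySem.Str.join "" (ls.map fireTailLine) := by
  induction ls with
  | nil =>
      intro acc
      apply pv_str_ext
      simp [PySem.Str.join, PySem.Chars.join, List.intercalate]
  | cons x xs ih =>
      intro acc
      rw [List.foldl_cons]
      show (xs.foldl fireStep (_, 0)).1 = _
      rw [ih, List.map_cons, pv_join_empty_cons]
      apply pv_str_ext
      simp [fireStep, fireTailLine, PySem.Int.toStr, PySem.Int.toChars]

-- main invariant: A's fold from green g equals B's zip-against-P head plus constant tail
theorem pv_main (ls : List String) : ∀ (P : List Int) (g : Int) (acc : String),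
    pvInv g P = true →
    (ls.foldl fireStep (acc, g)).1
      = acc ++ PySem.Str.join ""
          ((ls.zip P).map fireHeadLine ++ (ls.drop (min ls.length P.length)).map fireTailLine) := by
  induction ls with
  | nil =>
      intro P g acc _
      apply pv_str_ext
      simp [PySem.Str.join, PySem.Chars.join, List.intercalate]
  | cons x xs ih =>
      intro P g acc hinv
      cases P with
      | nil =>
          have hg : g = 0 := by simpa [pvInv] using hinv
          subst hg
          rw [pv_tail (x :: xs) acc]
          simp
      | cons p P' =>
          have hp : p = g := by
            have := hinv; simp [pvInv] at this; exact this.1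
          have hinv' : pvInv (if g ≠ 0 then (if g - 25 < 0 then 0 else g - 25) else g) P' = true := by
            have := hinv; simp [pvInv] at this
            simpa using this.2
          subst hp
          rw [List.foldl_cons]
          show (xs.foldl fireStep (_, _)).1 = _
          rw [ih P' _ _ hinv']
          rw [List.zip_cons_cons, List.map_cons, List.length_cons, List.length_cons,
            Nat.add_min_add_right, List.drop_succ_cons]
          apply pv_str_ext
          simp [pv_join_empty_cons, fireHeadLine]

-- ===== VERDICT (by name: the statement is the Claim_ definition above) =====
theorem fire_spec : Claim_equal_fire := by
  intro text _
  unfold Spec_fire fire fire_alt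
  have hpal : PySem.List.pyRange 250 (-1) (-25)
      = [250, 225, 200, 175, 150, 125, 100, 75, 50, 25, 0] := by decide
  have hinv : pvInv 250 [250, 225, 200, 175, 150, 125, 100, 75, 50, 25, 0] = true := by decide
  simp only [hpal]
  rw [pv_main (PySem.Str.splitlines text) _ 250 "" hinv]
  have hlen : ((((PySem.Str.splitlines text).zip
      ([250, 225, 200, 175, 150, 125, 100, 75, 50, 25, 0] : List Int)).map fireHeadLine).length : Int)
      = ((min (PySem.Str.splitlines text).length 11 : Nat) : Int) := by
    simp
  rw [hlen, PySem.List.slice_from_natCast]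
  apply pv_str_ext
  simp
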